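-- pv_equiv track=rewrite | github.com/amyteq/tt_share | h09a/P10_v9r6_a5.py | f_via_L
-- ===== SOURCE A (Python) =====
-- def f_via_L(N, limitL=None):
--     # Search L increasing from 1 upwards; find if sum N can be achieved.
--     import math, itertools
--     # We can precompute divisors of L and check combos.
--     L=1
--     while True:
--         # compute divisors
--         divs = []
--         i=1
--         while i*i <= L:
--             if L % i == 0:
--                 divs.append(i)
--                 if i*i!=L:
--                     divs.append(L//i)
--             i+=1
--         divs.sort()
--         if len(divs) >= 3:
--             # check any 3 distinct divisors sum to N
--             # use combination enumeration for small number of divisors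
--             from itertools import combinations
--             for a,b,c in combinations(divs,3):
--                 if a+b+c==N:
--                     return L
--         L+=1
-- ===== SOURCE B (Python) =====
-- def f_via_L(N, limitL=None):
--     # Two-sum over divisor pairs with a set lookup replaces triple enumeration.
--     L = 1
--     while True:
--         divs = []
--         i = 1
--         while i * i <= L:
--             if L % i == 0:
--                 divs.append(i)
--                 if i * i != L:
--                     divs.append(L // i)
--             i += 1
--         divs.sort()
--         dset = set(divs)
--         for i in range(len(divs)):
--             a = divs[i]
--             for j in range(i + 1, len(divs)):
--                 b = divs[j]
--                 c = N - a - b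
--                 if c > b and c in dset:
--                     return L
--         L += 1
-- ===== Notes on version B (the rewrite author's own statement) =====
-- stated objective: faster
-- what changed: Per candidate L, B replaces A's enumeration of all divisor triples (itertools.combinations(divs,3)) by a two-sum scan over divisor pairs that tests whether c = N-a-b is a divisor greater than b via a set lookup; the outer search over L and the divisor computation are unchanged.
import Mathlib
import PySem

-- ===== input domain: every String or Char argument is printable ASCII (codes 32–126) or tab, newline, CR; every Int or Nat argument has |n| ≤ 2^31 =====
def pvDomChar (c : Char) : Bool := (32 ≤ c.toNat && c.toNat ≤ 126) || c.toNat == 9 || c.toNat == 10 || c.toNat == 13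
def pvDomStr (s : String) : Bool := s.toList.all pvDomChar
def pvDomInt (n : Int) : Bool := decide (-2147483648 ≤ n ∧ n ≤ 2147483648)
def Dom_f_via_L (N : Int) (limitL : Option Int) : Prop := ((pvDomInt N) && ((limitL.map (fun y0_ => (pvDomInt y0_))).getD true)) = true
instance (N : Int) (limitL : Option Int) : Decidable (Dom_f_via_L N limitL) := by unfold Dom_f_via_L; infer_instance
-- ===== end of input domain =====

-- B replaces A's triple enumeration over divisors by a two-sum pair scan with a set
-- lookup (per L: O(d^2) instead of O(d^3)); return values are identical.
-- Both Pythons loop `while True`; the ports carry a fuel counter (2*N iterations) purely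
-- as a totality guard — for every N on which the Python returns (every N ≥ 6) the
-- answer L is ≤ 2*(N-3) < 2*N, so the fuel is never exhausted on admitted inputs.

-- ===== PORT A =====
-- inner `while i*i <= L` loop building the (unsorted) divisor list; shared verbatim by both Pythons
def pvDivsLoop (L i : Int) (acc : List Int) : List Int :=
  if _h : i * i ≤ L then
    pvDivsLoop L (i + 1)
      (if PySem.Int.mod L i = 0 then
        (if i * i ≠ L then acc ++ [i, PySem.Int.floordiv L i] else acc ++ [i])
       else acc)
  else acc
termination_by (L + 1 - i).toNat
decreasing_by
  have h2 : i ≤ i * i := by by_cases h1 : 1 ≤ i <;> nlinarith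
  omega

-- `divs.sort()` on the list the loop built (identical line in both Pythons)
def pvDivisors (L : Int) : List Int :=
  PySem.List.sorted (pvDivsLoop L 1 []) (fun x => x) false

-- itertools.combinations(divs, 2) / (divs, 3)
def pvPairs : List Int → List (Int × Int)
  | [] => []
  | x :: xs => xs.map (fun y => (x, y)) ++ pvPairs xs

def pvCombos3 : List Int → List (Int × Int × Int)
  | [] => []
  | x :: xs => (pvPairs xs).map (fun p => (x, p.1, p.2)) ++ pvCombos3 xs

-- A's body of one iteration: `if len(divs) >= 3: for a,b,c in combinations(divs,3): if a+b+c==N: return L`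
def pvCheckA (N : Int) (divs : List Int) : Bool :=
  decide (3 ≤ divs.length) && (pvCombos3 divs).any (fun t => t.1 + t.2.1 + t.2.2 == N)

def pvLoopA (N : Int) : Nat → Int → Int
  | 0, _ => 0
  | fuel + 1, L =>
    if pvCheckA N (pvDivisors L) then L else pvLoopA N fuel (L + 1)

def f_via_L (N : Int) (limitL : Option Int) : Int :=
  pvLoopA N (2 * N).toNat 1

-- ===== PORT B =====
-- B's pair scan: for each a, for each later b, test c = N-a-b with c > b and c in the set
def pvTwoSum (N : Int) (dset : PySem.Set Int) : List Int → Bool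
  | [] => false
  | a :: rest =>
    (rest.any (fun b => decide (N - a - b > b) && PySem.Set.contains dset (N - a - b)))
      || pvTwoSum N dset rest

def pvCheckB (N : Int) (divs : List Int) : Bool :=
  pvTwoSum N (PySem.Set.ofList divs) divs

def pvLoopB (N : Int) : Nat → Int → Int
  | 0, _ => 0
  | fuel + 1, L =>
    if pvCheckB N (pvDivisors L) then L else pvLoopB N fuel (L + 1)

def f_via_L_alt (N : Int) (limitL : Option Int) : Int :=
  pvLoopB N (2 * N).toNat 1

-- ===== PRECONDITION & SPEC =====
-- No Pre_: the two ports agree on every input. (For N < 6 the Python `while True` of both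
-- programs never returns — three distinct positive divisors sum to at least 1+2+3 = 6 —
-- and both ports return the same fuel-exhaustion value there, so equivalence still holds.)
def Spec_f_via_L (N : Int) (limitL : Option Int) (out : Int) : Prop := out = f_via_L_alt N limitL
instance (N : Int) (limitL : Option Int) (out : Int) : Decidable (Spec_f_via_L N limitL out) := by unfold Spec_f_via_L; infer_instance

-- ===== CLAIM (what is proved, stated in full; the proofs are below) =====
def Claim_equal_f_via_L : Prop := ∀ (N : Int) (limitL : Option Int), Dom_f_via_L N limitL → Spec_f_via_L N limitL (f_via_L N limitL)

-- ===== LEMMAS AND PROOFS =====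

-- sublists of a cons, specialised to 2- and 3-element lists
lemma pv_pair_sub_cons {x y a : Int} {rest : List Int} :
    List.Sublist [x, y] (a :: rest) ↔ (x = a ∧ y ∈ rest) ∨ List.Sublist [x, y] rest := by
  constructor
  · intro h
    cases h with
    | cons _ h => exact Or.inr h
    | cons₂ _ h => exact Or.inl ⟨rfl, List.singleton_sublist.mp h⟩
  · rintro (⟨rfl, hy⟩ | h)
    · exact List.Sublist.cons₂ _ (List.singleton_sublist.mpr hy)
    · exact List.Sublist.cons _ h

lemma pv_triple_sub_cons {x y z a : Int} {rest : List Int} :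
    List.Sublist [x, y, z] (a :: rest) ↔
      (x = a ∧ List.Sublist [y, z] rest) ∨ List.Sublist [x, y, z] rest := by
  constructor
  · intro h
    cases h with
    | cons _ h => exact Or.inr h
    | cons₂ _ h => exact Or.inl ⟨rfl, h⟩
  · rintro (⟨rfl, hy⟩ | h)
    · exact List.Sublist.cons₂ _ hy
    · exact List.Sublist.cons _ h

-- the divisor-list loop never produces duplicates
lemma pvDivsLoop_nodup (L : Int) : ∀ i acc, 1 ≤ i → acc.Nodup →
    (∀ a ∈ acc, 1 ≤ a ∧ (a < i ∨ L < i * a)) → (pvDivsLoop L i acc).Nodup := by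
  intro i acc
  fun_induction pvDivsLoop L i acc with
  | case2 i acc h => exact fun _ hnd _ => hnd
  | case1 i acc h ih =>
    intro hi hnd hinv
    by_cases hmod : PySem.Int.mod L i = 0
    · have hdvd : i ∣ L := (PySem.Int.mod_eq_zero_iff_dvd L i).mp hmod
      have hipos : (0 : Int) < i := hi
      have hq : PySem.Int.floordiv L i = L / i := PySem.Int.floordiv_eq_ediv_of_pos hipos
      have hLi : i * (L / i) = L := Int.mul_ediv_cancel' hdvd
      have hL1 : 1 ≤ L := by nlinarith
      have hq1 : 1 ≤ L / i := by
        by_contra hc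
        push Not at hc
        have hle : i * (L / i) ≤ 0 := mul_nonpos_of_nonneg_of_nonpos (by omega) (by omega)
        omega
      have hiq : i ≤ L / i := by
        by_contra hc
        push Not at hc
        have : i * (L / i) < i * i := mul_lt_mul_of_pos_left hc hipos
        omega
      by_cases hne : i * i ≠ L
      · have hqi : i < L / i := by
          rcases lt_or_eq_of_le hiq with h' | h'
          · exact h'
          · exact absurd (by rw [← hLi, ← h']) hne
        rw [if_pos hmod, if_pos hne]
        rw [dif_pos hmod, dif_pos hne] at ih
        apply ih (by omega)
        · rw [hq]
          refine List.nodup_append'.mpr ⟨hnd, by simp; omega, ?_⟩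
          intro a ha hmem
          obtain ⟨h1, h2⟩ := hinv a ha
          have hcase : a = i ∨ a = L / i := by simpa using hmem
          rcases hcase with rfl | rfl
          · rcases h2 with h' | h' <;> omega
          · rcases h2 with h' | h' <;> omega
        · intro a ha
          rw [hq] at ha
          rcases List.mem_append.mp ha with ha' | ha'
          · obtain ⟨h1, h2⟩ := hinv a ha'
            refine ⟨h1, ?_⟩
            rcases h2 with h' | h'
            · exact Or.inl (by omega)
            · exact Or.inr (by nlinarith)
          · have hcase : a = i ∨ a = L / i := by simpa using ha'
            rcases hcase with rfl | rfl
            · exact ⟨by omega, Or.inl (by omega)⟩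
            · exact ⟨by omega, Or.inr (by nlinarith)⟩
      · rw [if_pos hmod, if_neg hne]
        rw [dif_pos hmod, dif_neg hne] at ih
        apply ih (by omega)
        · refine List.nodup_append'.mpr ⟨hnd, by simp, ?_⟩
          intro a ha hmem
          obtain ⟨h1, h2⟩ := hinv a ha
          have hai : a = i := by simpa using hmem
          subst hai
          rcases h2 with h' | h' <;> omega
        · intro a ha
          rcases List.mem_append.mp ha with ha' | ha'
          · obtain ⟨h1, h2⟩ := hinv a ha'
            refine ⟨h1, ?_⟩
            rcases h2 with h' | h'
            · exact Or.inl (by omega)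
            · exact Or.inr (by nlinarith)
          · have hai : a = i := by simpa using ha'
            subst hai
            exact ⟨by omega, Or.inl (by omega)⟩
    · rw [if_neg hmod]
      rw [dif_neg hmod] at ih
      apply ih (by omega) hnd
      intro a ha
      obtain ⟨h1, h2⟩ := hinv a ha
      refine ⟨h1, ?_⟩
      rcases h2 with h' | h'
      · exact Or.inl (by omega)
      · exact Or.inr (by nlinarith)

lemma pvDivisors_pairwise_lt (L : Int) : (pvDivisors L).Pairwise (· < ·) := by
  have hnd0 : (pvDivsLoop L 1 []).Nodup :=
    pvDivsLoop_nodup L 1 [] le_rfl List.nodup_nil (by simp)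
  have hperm : (pvDivisors L).Perm (pvDivsLoop L 1 []) :=
    PySem.List.sorted_perm _ _ _
  have hnd : (pvDivisors L).Nodup := hperm.nodup_iff.mpr hnd0
  have hle : (pvDivisors L).Pairwise (· ≤ ·) := by
    have := PySem.List.sorted_pairwise (xs := pvDivsLoop L 1 []) (key := fun x => x)
    simpa [pvDivisors] using this
  exact List.sortedLT_iff_pairwise.mp
    ((List.sortedLE_iff_pairwise.mpr hle).sortedLT_of_nodup hnd)

lemma mem_pvPairs {p : Int × Int} {l : List Int} : p ∈ pvPairs l ↔ List.Sublist [p.1, p.2] l := by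
  obtain ⟨u, v⟩ := p
  induction l with
  | nil => simp [pvPairs]
  | cons x xs ih =>
    simp only [pvPairs, List.mem_append, List.mem_map, ih, pv_pair_sub_cons]
    constructor
    · rintro (⟨y, hy, h⟩ | h)
      · cases h
        exact Or.inl ⟨rfl, hy⟩
      · exact Or.inr h
    · rintro (⟨rfl, hv⟩ | h)
      · exact Or.inl ⟨v, hv, rfl⟩
      · exact Or.inr h

lemma mem_pvCombos3 {t : Int × Int × Int} {l : List Int} :
    t ∈ pvCombos3 l ↔ List.Sublist [t.1, t.2.1, t.2.2] l := by
  obtain ⟨u, v, w⟩ := t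
  induction l with
  | nil => simp [pvCombos3]
  | cons x xs ih =>
    simp only [pvCombos3, List.mem_append, List.mem_map, ih, pv_triple_sub_cons]
    constructor
    · rintro (⟨p, hp, h⟩ | h)
      · cases h
        exact Or.inl ⟨rfl, mem_pvPairs.mp hp⟩
      · exact Or.inr h
    · rintro (⟨rfl, hv⟩ | h)
      · exact Or.inl ⟨(v, w), mem_pvPairs.mpr hv, rfl⟩
      · exact Or.inr h

lemma pvCheckA_iff {N : Int} {l : List Int} :
    pvCheckA N l = true ↔ ∃ a b c, List.Sublist [a, b, c] l ∧ a + b + c = N := by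
  unfold pvCheckA
  simp only [Bool.and_eq_true, decide_eq_true_eq, List.any_eq_true, beq_iff_eq]
  constructor
  · rintro ⟨-, t, ht, hsum⟩
    exact ⟨t.1, t.2.1, t.2.2, mem_pvCombos3.mp ht, hsum⟩
  · rintro ⟨a, b, c, hsub, hsum⟩
    exact ⟨by simpa using hsub.length_le,
      ⟨(a, b, c), mem_pvCombos3.mpr (by simpa using hsub), hsum⟩⟩

lemma pvTwoSum_iff {N : Int} {s : PySem.Set Int} : ∀ {l : List Int},
    pvTwoSum N s l = true ↔
      ∃ a b, List.Sublist [a, b] l ∧ b < N - a - b ∧ (N - a - b) ∈ s := by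
  intro l
  induction l with
  | nil => simp [pvTwoSum]
  | cons a rest ih =>
    simp only [pvTwoSum, Bool.or_eq_true, List.any_eq_true, Bool.and_eq_true,
      decide_eq_true_eq, PySem.Set.contains_iff, ih]
    constructor
    · rintro (⟨b, hb, hlt, hmem⟩ | ⟨a', b', hsub, hlt, hmem⟩)
      · exact ⟨a, b, pv_pair_sub_cons.mpr (Or.inl ⟨rfl, hb⟩), hlt, hmem⟩
      · exact ⟨a', b', List.Sublist.cons _ hsub, hlt, hmem⟩
    · rintro ⟨a', b', hsub, hlt, hmem⟩
      rcases pv_pair_sub_cons.mp hsub with ⟨rfl, hb⟩ | h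
      · exact Or.inl ⟨b', hb, hlt, hmem⟩
      · exact Or.inr ⟨a', b', h, hlt, hmem⟩

lemma pvCheckB_iff {N : Int} {l : List Int} :
    pvCheckB N l = true ↔
      ∃ a b, List.Sublist [a, b] l ∧ b < N - a - b ∧ (N - a - b) ∈ l := by
  unfold pvCheckB
  simp only [pvTwoSum_iff, PySem.Set.mem_ofList]

-- on a strictly increasing list, two members in order form a 2-element sublist …
lemma pv_sub2_of_mem {l : List Int} {b c : Int} (hs : l.Pairwise (· < ·))
    (hb : b ∈ l) (hc : c ∈ l) (hbc : b < c) : List.Sublist [b, c] l := by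
  induction l with
  | nil => cases hb
  | cons x xs ih =>
    rw [List.pairwise_cons] at hs
    rcases List.mem_cons.mp hb with rfl | hb'
    · have hcx : c ∈ xs := by
        rcases List.mem_cons.mp hc with rfl | h
        · omega
        · exact h
      exact List.Sublist.cons₂ _ (List.singleton_sublist.mpr hcx)
    · have hcx : c ∈ xs := by
        rcases List.mem_cons.mp hc with rfl | h
        · exact absurd (hs.1 b hb') (by omega)
        · exact h
      exact List.Sublist.cons _ (ih hs.2 hb' hcx)

-- … and a 2-element sublist extends by any larger member to a 3-element sublist
lemma pv_sub3_of_sub2 {l : List Int} {a b c : Int} (hs : l.Pairwise (· < ·))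
    (hab : List.Sublist [a, b] l) (hc : c ∈ l) (hbc : b < c) :
    List.Sublist [a, b, c] l := by
  induction l with
  | nil => simp at hab
  | cons x xs ih =>
    rw [List.pairwise_cons] at hs
    rcases pv_pair_sub_cons.mp hab with ⟨rfl, hb⟩ | hab'
    · have hcx : c ∈ xs := by
        rcases List.mem_cons.mp hc with rfl | h
        · exact absurd (hs.1 b hb) (by omega)
        · exact h
      exact List.Sublist.cons₂ _ (pv_sub2_of_mem hs.2 hb hcx hbc)
    · have hbxs : b ∈ xs := hab'.subset (by simp)
      have hcx : c ∈ xs := by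
        rcases List.mem_cons.mp hc with rfl | h
        · exact absurd (hs.1 b hbxs) (by omega)
        · exact h
      exact List.Sublist.cons _ (ih hs.2 hab' hcx)

-- on a strictly increasing list, the two checks agree
lemma pvCheckA_eq_pvCheckB {N : Int} {l : List Int} (hs : l.Pairwise (· < ·)) :
    pvCheckA N l = pvCheckB N l := by
  have hiff : (pvCheckA N l = true) ↔ (pvCheckB N l = true) := by
    rw [pvCheckA_iff, pvCheckB_iff]
    constructor
    · rintro ⟨a, b, c, hsub, hsum⟩
      have hsub2 : List.Sublist [a, b] l :=
        (List.Sublist.cons₂ a (List.Sublist.cons₂ b (List.nil_sublist [c]))).trans hsub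
      have hsort3 := hs.sublist hsub
      have hbc : b < c := by
        rw [List.pairwise_cons, List.pairwise_cons] at hsort3
        simpa using hsort3.2.1
      have hceq : c = N - a - b := by omega
      refine ⟨a, b, hsub2, by omega, ?_⟩
      rw [← hceq]
      exact hsub.subset (by simp)
    · rintro ⟨a, b, hsub, hlt, hmem⟩
      exact ⟨a, b, N - a - b, pv_sub3_of_sub2 hs hsub hmem hlt, by ring⟩
  cases hA : pvCheckA N l <;> cases hB : pvCheckB N l <;> simp_all

lemma pvLoopA_eq_pvLoopB (N : Int) : ∀ fuel L, pvLoopA N fuel L = pvLoopB N fuel L := by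
  intro fuel
  induction fuel with
  | zero => intro L; rfl
  | succ n ih =>
    intro L
    simp only [pvLoopA, pvLoopB, pvCheckA_eq_pvCheckB (pvDivisors_pairwise_lt L), ih]

-- ===== VERDICT (by name: the statement is the Claim_ definition above) =====
theorem f_via_L_spec : Claim_equal_f_via_L := by
  intro N limitL _
  unfold Spec_f_via_L f_via_L f_via_L_alt
  exact pvLoopA_eq_pvLoopB N _ 1
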